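-- pv_equiv track=rewrite | github.com/vawsgit/accelerated-intelligent-document-processing-on-aws | lib/idp_common_pkg/idp_common/agents/error_analyzer/tools/cloudwatch_tool.py | _prioritize_log_groups
-- ===== SOURCE A (Python) =====
-- from typing import Any, Dict, List, Optional
--
-- def _prioritize_log_groups(
--     log_groups: List[Dict[str, str]], document_status: str = None
-- ) -> List[Dict[str, str]]:
--     """
--     Prioritize log groups by business logic importance with status-aware prioritization.
--
--     - Failed documents: Focus on Classification/Extraction functions first
--     - In-progress documents: Focus on QueueProcessor/WorkflowTracker first
--     - Completed documents: Use standard prioritization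
--     """
--
--     # Status-aware priority patterns (using generic matching)
--     if document_status == "FAILED":
--         priority_patterns = [
--             "Classification",  # Classification failures
--             "Extraction",  # Extraction failures
--             "Function",  # Other processing functions (OCR, BDA)
--             "Processor",  # Ingestion issues (QueueProcessor)
--             "Workflow",  # Orchestration (WorkflowTracker, workflow)
--             "QueueSender",  # Supporting functions
--         ]
--     elif document_status == "IN_PROGRESS":
--         priority_patterns = [
--             "Processor",  # Current ingestion activity (QueueProcessor)
--             "Workflow",  # Current status tracking (WorkflowTracker, workflow)
--             "Function",  # Currently processing functions
--             "QueueSender",  # Supporting functions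
--         ]
--     else:
--         # Default/COMPLETED behavior
--         priority_patterns = [
--             "Function",  # Pattern functions (BDA, OCR, Classification, Extraction)
--             "Workflow",  # Step Functions (workflow, WorkflowTracker)
--             "Processor",  # Document ingestion (QueueProcessor)
--             "QueueSender",  # Supporting functions
--         ]
--
--     prioritized = []
--     remaining = log_groups.copy()
--
--     for i, pattern in enumerate(priority_patterns):
--         matching = [lg for lg in remaining if pattern.lower() in lg["name"].lower()]
--         if matching:
--             prioritized.extend(matching)
--             remaining = [lg for lg in remaining if lg not in matching]
--
--     # Add any remaining log groups
--     if remaining: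
--         prioritized.extend(remaining)
--
--     return prioritized
-- ===== SOURCE B (Python) =====
-- def _prioritize_log_groups(log_groups, document_status=None):
--     """Bucket each log group once by the index of the first matching priority
--     pattern (unmatched go last), then flatten the buckets."""
--     if document_status == "FAILED":
--         patterns = ["Classification", "Extraction", "Function", "Processor", "Workflow", "QueueSender"]
--     elif document_status == "IN_PROGRESS":
--         patterns = ["Processor", "Workflow", "Function", "QueueSender"]
--     else:
--         patterns = ["Function", "Workflow", "Processor", "QueueSender"]
--     lowered = [p.lower() for p in patterns]
--     buckets = [[] for _ in range(len(lowered) + 1)]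
--     for lg in log_groups:
--         name = lg["name"].lower()
--         idx = next((i for i, p in enumerate(lowered) if p in name), len(lowered))
--         buckets[idx].append(lg)
--     return [lg for bucket in buckets for lg in bucket]
-- ===== Notes on version B (the rewrite author's own statement) =====
-- stated objective: alternative
-- what changed: Replaces A's per-pattern repeated filtering and membership-based removal from a shrinking 'remaining' list with a single pass over the log groups that drops each one into the bucket of its first matching pattern (unmatched last) and flattens the buckets.
-- outside the precondition, e.g. on _prioritize_log_groups([{'group': 'g'}], None): A raises KeyError, B raises KeyError
import Mathlib
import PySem

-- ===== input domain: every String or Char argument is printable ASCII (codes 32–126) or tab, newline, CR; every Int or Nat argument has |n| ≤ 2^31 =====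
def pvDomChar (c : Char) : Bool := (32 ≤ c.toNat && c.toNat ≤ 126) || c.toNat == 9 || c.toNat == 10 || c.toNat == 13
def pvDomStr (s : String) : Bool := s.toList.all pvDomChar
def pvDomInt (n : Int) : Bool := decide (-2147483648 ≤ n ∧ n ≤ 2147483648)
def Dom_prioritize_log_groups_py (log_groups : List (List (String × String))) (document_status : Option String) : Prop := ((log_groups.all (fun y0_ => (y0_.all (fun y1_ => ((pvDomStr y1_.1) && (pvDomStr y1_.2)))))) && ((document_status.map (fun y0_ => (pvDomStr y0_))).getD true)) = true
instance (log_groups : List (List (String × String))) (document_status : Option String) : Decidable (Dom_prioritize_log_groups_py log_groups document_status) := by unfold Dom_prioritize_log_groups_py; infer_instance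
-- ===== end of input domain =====

-- B replaces A's per-pattern filter-and-remove passes with one bucketing pass over the log groups; return values proved equal, neither mutates its input.

-- status -> priority pattern list (identical branch cascade in A and B)
def pvPatterns (document_status : Option String) : List String :=
  if document_status = some "FAILED" then
    ["Classification", "Extraction", "Function", "Processor", "Workflow", "QueueSender"]
  else if document_status = some "IN_PROGRESS" then
    ["Processor", "Workflow", "Function", "QueueSender"]
  else
    ["Function", "Workflow", "Processor", "QueueSender"]

-- lg["name"]; Pre_ guarantees the key is present, so the "" default is never taken on admitted inputs
def pvName (lg : List (String × String)) : String :=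
  ((PySem.Dict.ofList lg).get? "name").getD ""

-- ===== PORT A =====
-- the comprehension predicate: pattern.lower() in lg["name"].lower()
def pvM (pattern : String) (lg : List (String × String)) : Bool :=
  PySem.Str.isIn (PySem.Str.lower pattern) (PySem.Str.lower (pvName lg))

-- one iteration of A's loop over priority_patterns, state = (prioritized, remaining)
def pvStepA (st : List (List (String × String)) × List (List (String × String)))
    (pattern : String) : List (List (String × String)) × List (List (String × String)) :=
  let matching := st.2.filter (fun lg => pvM pattern lg)
  if matching.isEmpty then st
  else (st.1 ++ matching, st.2.filter (fun lg => !(matching.contains lg)))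

def prioritize_log_groups_py (log_groups : List (List (String × String))) (document_status : Option String) : List (List (String × String)) :=
  let priority_patterns := pvPatterns document_status
  let st := priority_patterns.foldl pvStepA ([], log_groups)
  st.1 ++ st.2

-- ===== PORT B =====
def prioritize_log_groups_py_alt (log_groups : List (List (String × String))) (document_status : Option String) : List (List (String × String)) :=
  let lowered := (pvPatterns document_status).map PySem.Str.lower
  let buckets : List (List (List (String × String))) :=
    (List.range (lowered.length + 1)).map (fun _ => [])
  let buckets := log_groups.foldl
    (fun bs lg =>
      bs.modify (lowered.findIdx (fun p => PySem.Str.isIn p (PySem.Str.lower (pvName lg))))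
        (· ++ [lg]))
    buckets
  buckets.flatten

-- ===== PRECONDITION & SPEC =====
-- Pre_ excludes log groups without a "name" key: Python A raises KeyError there (and B's Python raises too).
def Pre_prioritize_log_groups_py (log_groups : List (List (String × String))) (document_status : Option String) : Prop :=
  ∀ lg ∈ log_groups, ((PySem.Dict.ofList lg).get? "name").isSome = true
instance (log_groups : List (List (String × String))) (document_status : Option String) : Decidable (Pre_prioritize_log_groups_py log_groups document_status) := by unfold Pre_prioritize_log_groups_py; infer_instance

def pvWitness_prioritize_log_groups_py : (List (List (String × String))) × Option String :=
  ([[("name", "OCRFunction"), ("env", "prod")], [("name", "QueueProcessor")], [("name", "misc")]], some "FAILED")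

def Spec_prioritize_log_groups_py (log_groups : List (List (String × String))) (document_status : Option String) (out : List (List (String × String))) : Prop := out = prioritize_log_groups_py_alt log_groups document_status
instance (log_groups : List (List (String × String))) (document_status : Option String) (out : List (List (String × String))) : Decidable (Spec_prioritize_log_groups_py log_groups document_status out) := by unfold Spec_prioritize_log_groups_py; infer_instance

-- ===== CLAIM (what is proved, stated in full; the proofs are below) =====
def Claim_equal_prioritize_log_groups_py : Prop := ∀ (log_groups : List (List (String × String))) (document_status : Option String), Dom_prioritize_log_groups_py log_groups document_status → Pre_prioritize_log_groups_py log_groups document_status → Spec_prioritize_log_groups_py log_groups document_status (prioritize_log_groups_py log_groups document_status)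

-- ===== LEMMAS AND PROOFS =====

-- index of the first pattern matching lg (= length when none matches)
def pvKey (pats : List String) (lg : List (String × String)) : Nat :=
  pats.findIdx (fun p => pvM p lg)

-- what A's loop computes: match-bucket of the first pattern, then recurse on the non-matchers
def pvBuckets (pats : List String) (rem : List (List (String × String))) : List (List (String × String)) :=
  match pats with
  | [] => rem
  | p :: ps => rem.filter (fun lg => pvM p lg) ++ pvBuckets ps (rem.filter (fun lg => !(pvM p lg)))

lemma pvStepA_eq (pattern : String) (acc rem : List (List (String × String))) :
    pvStepA (acc, rem) pattern
      = (acc ++ rem.filter (fun lg => pvM pattern lg), rem.filter (fun lg => !(pvM pattern lg))) := by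
  unfold pvStepA
  by_cases h : (rem.filter (fun lg => pvM pattern lg)).isEmpty
  · rw [List.isEmpty_iff] at h
    have hall := List.filter_eq_nil_iff.mp h
    simp only [h, List.isEmpty_nil, if_true, List.append_nil]
    rw [List.filter_eq_self.mpr (fun a ha => by simp [hall a ha])]
  · simp only [h]
    refine Prod.ext rfl ?_
    exact List.filter_congr (fun lg hlg => by
      simp [List.contains_eq_mem, List.mem_filter, hlg])

lemma pvFoldA (pats : List String) (acc rem : List (List (String × String))) :
    (pats.foldl pvStepA (acc, rem)).1 ++ (pats.foldl pvStepA (acc, rem)).2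
      = acc ++ pvBuckets pats rem := by
  induction pats generalizing acc rem with
  | nil => simp [pvBuckets]
  | cons p ps ih =>
    rw [List.foldl_cons, pvStepA_eq, ih, pvBuckets, List.append_assoc]

lemma pvKey_nil (lg : List (String × String)) : pvKey [] lg = 0 := rfl

lemma pvKey_cons (p : String) (ps : List String) (lg : List (String × String)) :
    pvKey (p :: ps) lg = if pvM p lg then 0 else pvKey ps lg + 1 := by
  simp [pvKey, List.findIdx_cons, Bool.cond_eq_ite]

lemma pvFlatMapRangeSucc {α : Type} (n : Nat) (F : Nat → List α) :
    (List.range (n + 1)).flatMap F = F 0 ++ (List.range n).flatMap (fun i => F (i + 1)) := by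
  rw [List.range_succ_eq_map, List.flatMap_cons, List.flatMap_map]

lemma pvBuckets_eq_flatMap (pats : List String) (rem : List (List (String × String))) :
    pvBuckets pats rem
      = (List.range (pats.length + 1)).flatMap
          (fun i => rem.filter (fun lg => pvKey pats lg == i)) := by
  induction pats generalizing rem with
  | nil =>
    simp [pvBuckets, List.range_succ, pvKey_nil]
  | cons p ps ih =>
    rw [pvBuckets, ih, List.length_cons]
    have hsplit : (List.range (ps.length + 1 + 1)).flatMap
          (fun i => rem.filter (fun lg => pvKey (p :: ps) lg == i))
        = rem.filter (fun lg => pvKey (p :: ps) lg == 0)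
          ++ (List.range (ps.length + 1)).flatMap
              (fun i => rem.filter (fun lg => pvKey (p :: ps) lg == (i + 1))) :=
      pvFlatMapRangeSucc _ _
    rw [hsplit]
    have h1 : List.filter (fun lg => pvM p lg) rem
        = List.filter (fun lg => pvKey (p :: ps) lg == 0) rem :=
      List.filter_congr (fun lg _ => by
        rw [pvKey_cons]; by_cases h : pvM p lg <;> simp [h])
    have h2 : (fun i => List.filter (fun lg => pvKey ps lg == i)
          (List.filter (fun lg => !pvM p lg) rem))
        = fun i => List.filter (fun lg => pvKey (p :: ps) lg == i + 1) rem := by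
      funext i
      rw [List.filter_filter]
      exact List.filter_congr (fun lg _ => by
        rw [pvKey_cons]; by_cases h : pvM p lg <;> simp [h])
    exact congrArg₂ (fun a b => a ++ b) h1
      (congrArg (fun F => List.flatMap F (List.range (ps.length + 1))) h2)

lemma pvFoldB_len (lgs : List (List (String × String))) (k : List (String × String) → Nat)
    (bs : List (List (List (String × String)))) :
    (lgs.foldl (fun bs lg => bs.modify (k lg) (· ++ [lg])) bs).length = bs.length := by
  induction lgs generalizing bs with
  | nil => rfl
  | cons lg rest ih =>
    simpa [List.length_modify] using ih (bs.modify (k lg) (· ++ [lg]))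

lemma pvFoldB_get (lgs : List (List (String × String))) (k : List (String × String) → Nat)
    (bs : List (List (List (String × String)))) (i : Nat) (hi : i < bs.length) :
    (lgs.foldl (fun bs lg => bs.modify (k lg) (· ++ [lg])) bs)[i]'(by
        rw [pvFoldB_len]; exact hi)
      = bs[i] ++ lgs.filter (fun lg => k lg == i) := by
  induction lgs generalizing bs with
  | nil => simp
  | cons lg rest ih =>
    have h := ih (bs.modify (k lg) (· ++ [lg])) (by simpa [List.length_modify] using hi)
    simp only [List.foldl_cons]
    rw [h, List.getElem_modify]
    by_cases hk : k lg = i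
    · simp [hk, List.append_assoc]
    · simp [hk]

lemma pvAltChar (log_groups : List (List (String × String))) (document_status : Option String) :
    prioritize_log_groups_py_alt log_groups document_status
      = (List.range ((pvPatterns document_status).length + 1)).flatMap
          (fun i => log_groups.filter (fun lg => pvKey (pvPatterns document_status) lg == i)) := by
  unfold prioritize_log_groups_py_alt
  have hkey : (fun (bs : List (List (List (String × String)))) lg =>
        bs.modify (((pvPatterns document_status).map PySem.Str.lower).findIdx
          (fun p => PySem.Str.isIn p (PySem.Str.lower (pvName lg)))) (· ++ [lg]))
      = fun bs lg => bs.modify (pvKey (pvPatterns document_status) lg) (· ++ [lg]) := by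
    funext bs lg
    rw [List.findIdx_map]
    rfl
  simp only [hkey, List.length_map]
  set pats := pvPatterns document_status with hp
  set bs0 : List (List (List (String × String))) := (List.range (pats.length + 1)).map (fun _ => []) with hbs0
  have hbs0len : bs0.length = pats.length + 1 := by simp [hbs0]
  rw [List.flatMap_def]
  congr 1
  apply List.ext_getElem
  · rw [pvFoldB_len, hbs0len, List.length_map, List.length_range]
  · intro i h1 h2
    have hi : i < bs0.length := by rw [pvFoldB_len] at h1; exact h1
    rw [pvFoldB_get log_groups (pvKey pats) bs0 i hi]
    have hnil : bs0[i] = ([] : List (List (String × String))) := by simp [hbs0]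
    rw [hnil, List.nil_append]
    rw [List.getElem_map, List.getElem_range]

-- ===== VERDICT (by name: the statement is the Claim_ definition above) =====
theorem prioritize_log_groups_py_spec : Claim_equal_prioritize_log_groups_py := by
  intro log_groups document_status _ _
  unfold Spec_prioritize_log_groups_py
  unfold prioritize_log_groups_py
  rw [pvAltChar, pvFoldA, List.nil_append, pvBuckets_eq_flatMap]
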